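-- pv_equiv track=rewrite | github.com/mafpub/best.football | scrapers/schools/ca/060165010751.py | _keyword_lines
-- ===== SOURCE A (Python) =====
-- PROGRAM_KEYWORDS = (
--     "athletics",
--     "athletic",
--     "sports",
--     "football",
--     "basketball",
--     "soccer",
--     "volleyball",
--     "baseball",
--     "softball",
--     "wrestling",
--     "cross country",
--     "track",
--     "coach",
--     "roster",
--     "tryout",
--     "cif",
-- )
--
-- def _dedupe(values: list[str]) -> list[str]:
--     seen: set[str] = set()
--     out: list[str] = []
--     for value in values:
--         item = value.strip()
--         if not item or item in seen:
--             continue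
--         seen.add(item)
--         out.append(item)
--     return out
--
-- def _keyword_lines(text: str) -> list[str]:
--     lines: list[str] = []
--     for raw_line in text.splitlines():
--         line = " ".join(raw_line.split()).strip()
--         if not line:
--             continue
--         lowered = line.lower()
--         if any(keyword in lowered for keyword in PROGRAM_KEYWORDS):
--             lines.append(line)
--     return _dedupe(lines)[:25]
-- ===== SOURCE B (Python) =====
-- PROGRAM_KEYWORDS = (
--     "athletics",
--     "athletic",
--     "sports",
--     "football",
--     "basketball",
--     "soccer",
--     "volleyball",
--     "baseball",
--     "softball",
--     "wrestling",
--     "cross country",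
--     "track",
--     "coach",
--     "roster",
--     "tryout",
--     "cif",
-- )
--
-- def _keyword_lines(text: str) -> list[str]:
--     # Single pass: dedupe and the 25-cap are fused into the scan, so duplicate
--     # lines skip the keyword search and the scan stops once 25 lines are found.
--     seen: set[str] = set()
--     out: list[str] = []
--     for raw_line in text.splitlines():
--         line = " ".join(raw_line.split())
--         if not line or line in seen:
--             continue
--         lowered = line.lower()
--         if any(keyword in lowered for keyword in PROGRAM_KEYWORDS):
--             seen.add(line)
--             out.append(line)
--             if len(out) == 25:
--                 break
--     return out
-- ===== Notes on version B (the rewrite author's own statement) =====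
-- stated objective: alternative
-- what changed: A makes three passes (collect all matching lines, then a separate _dedupe pass over that list, then a [:25] slice); B is one fused scan that checks the seen-set before the keyword search, appends as it goes, and breaks as soon as 25 lines are collected.
import Mathlib
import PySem

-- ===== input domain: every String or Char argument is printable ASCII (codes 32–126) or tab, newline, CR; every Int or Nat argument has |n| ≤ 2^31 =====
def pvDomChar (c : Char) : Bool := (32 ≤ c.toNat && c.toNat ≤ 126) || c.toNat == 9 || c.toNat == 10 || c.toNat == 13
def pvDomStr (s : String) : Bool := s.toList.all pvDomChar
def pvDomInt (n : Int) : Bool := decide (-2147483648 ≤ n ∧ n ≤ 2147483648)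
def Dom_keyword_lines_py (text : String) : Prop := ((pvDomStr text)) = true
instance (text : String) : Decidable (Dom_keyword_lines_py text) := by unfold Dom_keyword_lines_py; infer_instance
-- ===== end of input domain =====

-- B fuses A's three passes (collect matches, _dedupe, [:25] slice) into one scan with an
-- early break at 25; objective: alternative/constant-factor (dups skip the keyword search).

-- ===== PORT A =====
def PROGRAM_KEYWORDS : List String :=
  ["athletics", "athletic", "sports", "football", "basketball", "soccer", "volleyball",
   "baseball", "softball", "wrestling", "cross country", "track", "coach", "roster",
   "tryout", "cif"]

-- port of _dedupe: fold over values with (seen, out) state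
def dedupe_py (values : List String) : List String :=
  (values.foldl
    (fun (st : PySem.Set String × List String) value =>
      let item := PySem.Str.strip value
      if item = "" ∨ PySem.Set.contains st.1 item then st
      else (PySem.Set.add st.1 item, st.2 ++ [item]))
    ((PySem.Set.empty : PySem.Set String), ([] : List String))).2

def keyword_lines_py (text : String) : List String :=
  let lines := (PySem.Str.splitlines text).foldl
    (fun (lines : List String) raw_line =>
      let line := PySem.Str.join " " (PySem.Str.split₀ raw_line)
      if line = "" then lines
      else
        let lowered := PySem.Str.lower line
        if PROGRAM_KEYWORDS.any (fun keyword => PySem.Str.isIn keyword lowered) then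
          lines ++ [line]
        else lines)
    ([] : List String)
  PySem.List.slice (dedupe_py lines) none (some 25)

-- ===== PORT B =====
-- single pass with seen-set, output list and early break at 25 entries
def kwl_go (rows : List String) (seen : PySem.Set String) (out : List String) : List String :=
  match rows with
  | [] => out
  | raw_line :: rest =>
    let line := PySem.Str.join " " (PySem.Str.split₀ raw_line)
    if line = "" ∨ PySem.Set.contains seen line then kwl_go rest seen out
    else
      let lowered := PySem.Str.lower line
      if PROGRAM_KEYWORDS.any (fun keyword => PySem.Str.isIn keyword lowered) then
        let out' := out ++ [line]
        if out'.length = 25 then out' else kwl_go rest (PySem.Set.add seen line) out'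
      else kwl_go rest seen out

def keyword_lines_py_alt (text : String) : List String :=
  kwl_go (PySem.Str.splitlines text) PySem.Set.empty []

-- ===== PRECONDITION & SPEC =====
def Spec_keyword_lines_py (text : String) (out : List String) : Prop := out = keyword_lines_py_alt text
instance (text : String) (out : List String) : Decidable (Spec_keyword_lines_py text out) := by unfold Spec_keyword_lines_py; infer_instance

-- ===== CLAIM (what is proved, stated in full; the proofs are below) =====
def Claim_equal_keyword_lines_py : Prop := ∀ (text : String), Dom_keyword_lines_py text → Spec_keyword_lines_py text (keyword_lines_py text)

-- ===== LEMMAS AND PROOFS =====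

-- the normalized line of a raw line
def pvNorm (raw : String) : String := PySem.Str.join " " (PySem.Str.split₀ raw)

def pvAnyKw (line : String) : Bool :=
  PROGRAM_KEYWORDS.any (fun keyword => PySem.Str.isIn keyword (PySem.Str.lower line))

-- spec form of A's first loop (matching normalized lines, in order)
def pvMatches : List String → List String
  | [] => []
  | raw :: rest =>
    let line := pvNorm raw
    if line = "" then pvMatches rest
    else if pvAnyKw line then line :: pvMatches rest
    else pvMatches rest

-- spec form of _dedupe
def pvDedupeGo : List String → PySem.Set String → List String
  | [], _ => []
  | v :: rest, seen =>
    let item := PySem.Str.strip v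
    if item = "" ∨ PySem.Set.contains seen item then pvDedupeGo rest seen
    else item :: pvDedupeGo rest (PySem.Set.add seen item)

-- fused spec: collect the deduped matching lines in one pass
def pvCollect : List String → PySem.Set String → List String
  | [], _ => []
  | raw :: rest, seen =>
    let line := pvNorm raw
    if line = "" ∨ PySem.Set.contains seen line then pvCollect rest seen
    else if pvAnyKw line then line :: pvCollect rest (PySem.Set.add seen line)
    else pvCollect rest seen

-- words produced by split₀ are nonempty and whitespace-free
theorem pv_split₀_go_ok (s cur : List Char) (acc : List (List Char))
    (hcur : ∀ c ∈ cur, PySem.Chars.isspace c = false)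
    (hacc : ∀ w ∈ acc, w ≠ [] ∧ ∀ c ∈ w, PySem.Chars.isspace c = false) :
    ∀ w ∈ PySem.Chars.split₀.go s cur acc, w ≠ [] ∧ ∀ c ∈ w, PySem.Chars.isspace c = false := by
  induction s generalizing cur acc with
  | nil =>
    intro w hw
    simp only [PySem.Chars.split₀.go] at hw
    split at hw
    · exact hacc w (List.mem_reverse.mp hw)
    · next hne =>
      rcases List.mem_cons.mp (List.mem_reverse.mp hw) with h | h
      · subst h
        refine ⟨by simpa using List.isEmpty_eq_false_iff.mp (Bool.not_eq_true _ ▸ by simpa using hne), ?_⟩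
        intro c hc
        exact hcur c (List.mem_reverse.mp hc)
      · exact hacc w h
  | cons c rest ih =>
    intro w hw
    simp only [PySem.Chars.split₀.go] at hw
    split at hw
    · split at hw
      · exact ih [] acc (by simp) hacc w hw
      · next hne =>
        refine ih [] (cur.reverse :: acc) (by simp) ?_ w hw
        intro w' hw'
        rcases List.mem_cons.mp hw' with h | h
        · subst h
          refine ⟨by simpa using List.isEmpty_eq_false_iff.mp (Bool.not_eq_true _ ▸ by simpa using hne), ?_⟩
          intro c' hc'
          exact hcur c' (List.mem_reverse.mp hc')
        · exact hacc w' h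
    · next hns =>
      refine ih (c :: cur) acc ?_ hacc w hw
      intro c' hc'
      rcases List.mem_cons.mp hc' with h | h
      · subst h; simpa using hns
      · exact hcur c' h

theorem pv_split₀_ok (s : List Char) :
    ∀ w ∈ PySem.Chars.split₀ s, w ≠ [] ∧ ∀ c ∈ w, PySem.Chars.isspace c = false := by
  exact pv_split₀_go_ok s [] [] (by simp) (by simp)

theorem pv_dropWhile_all {p : Char → Bool} (l : List Char) (h : ∀ c ∈ l, p c = false) :
    l.dropWhile p = l := by
  cases l with
  | nil => rfl
  | cons a t => simp [h a (by simp)]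

theorem pv_dropWhile_append {p : Char → Bool} (l m : List Char) (hne : l ≠ [])
    (hl : l.dropWhile p = l) : (l ++ m).dropWhile p = l ++ m := by
  cases l with
  | nil => exact absurd rfl hne
  | cons a t =>
    have ha : p a = false := by
      by_contra hpa
      have : p a = true := by simpa using hpa
      rw [List.dropWhile_cons, if_pos this] at hl
      have := congrArg List.length hl
      have := List.length_dropWhile_le p t
      simp at *
      omega
    simp [ha]

theorem pv_join_ne_nil (w : List Char) (ws : List (List Char)) (hw : w ≠ []) :
    PySem.Chars.join [' '] (w :: ws) ≠ [] := by
  cases ws with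
  | nil => simpa [PySem.Chars.join, List.intercalate]
  | cons w2 ws' =>
    simp only [PySem.Chars.join, List.intercalate, List.intersperse]
    simp
theorem pv_join_cons_cons (w w2 : List Char) (ws : List (List Char)) :
    PySem.Chars.join [' '] (w :: w2 :: ws) = w ++ ' ' :: PySem.Chars.join [' '] (w2 :: ws) := by
  simp [PySem.Chars.join, List.intercalate, List.intersperse]
theorem pv_lstrip_join (ws : List (List Char))
    (hok : ∀ w ∈ ws, w ≠ [] ∧ ∀ c ∈ w, PySem.Chars.isspace c = false) :
    PySem.Chars.lstrip (PySem.Chars.join [' '] ws) = PySem.Chars.join [' '] ws := by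
  cases ws with
  | nil => rfl
  | cons w ws' =>
    obtain ⟨hne, hns⟩ := hok w (by simp)
    cases ws' with
    | nil =>
      simpa [PySem.Chars.lstrip, PySem.Chars.join, List.intercalate] using
        pv_dropWhile_all w hns
    | cons w2 ws'' =>
      rw [pv_join_cons_cons]
      exact pv_dropWhile_append w _ hne (pv_dropWhile_all w hns)
theorem pv_rstrip_join (ws : List (List Char))
    (hok : ∀ w ∈ ws, w ≠ [] ∧ ∀ c ∈ w, PySem.Chars.isspace c = false) :
    PySem.Chars.rstrip (PySem.Chars.join [' '] ws) = PySem.Chars.join [' '] ws := by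
  induction ws with
  | nil => rfl
  | cons w ws' ih =>
    obtain ⟨hne, hns⟩ := hok w (by simp)
    cases ws' with
    | nil =>
      have : (PySem.Chars.join [' '] [w]).reverse.dropWhile PySem.Chars.isspace
          = (PySem.Chars.join [' '] [w]).reverse := by
        apply pv_dropWhile_all
        intro c hc
        exact hns c (by simpa [PySem.Chars.join, List.intercalate] using hc)
      simp only [PySem.Chars.rstrip, this]
      simp
    | cons w2 ws'' =>
      have ihr := ih (fun w' hw' => hok w' (by simp [hw']))
      obtain ⟨hne2, _⟩ := hok w2 (by simp)
      have hjne : PySem.Chars.join [' '] (w2 :: ws'') ≠ [] := pv_join_ne_nil w2 ws'' hne2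
      rw [pv_join_cons_cons]
      unfold PySem.Chars.rstrip at ihr ⊢
      rw [List.reverse_append]
      have hrne : (PySem.Chars.join [' '] (w2 :: ws'')).reverse ≠ [] := by
        simpa using hjne
      have hdw : (PySem.Chars.join [' '] (w2 :: ws'')).reverse.dropWhile PySem.Chars.isspace
          = (PySem.Chars.join [' '] (w2 :: ws'')).reverse := by
        have := congrArg List.reverse ihr
        simpa using this
      rw [show (' ' :: PySem.Chars.join [' '] (w2 :: ws'')).reverse
            = (PySem.Chars.join [' '] (w2 :: ws'')).reverse ++ [' '] by simp]
      rw [List.append_assoc, pv_dropWhile_append _ _ hrne hdw]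
      simp
theorem pv_strip_norm (raw : String) : PySem.Str.strip (pvNorm raw) = pvNorm raw := by
  have key : PySem.Chars.strip (PySem.Chars.join [' '] (PySem.Chars.split₀ raw.toList))
      = PySem.Chars.join [' '] (PySem.Chars.split₀ raw.toList) := by
    show PySem.Chars.rstrip (PySem.Chars.lstrip _) = _
    rw [pv_lstrip_join _ (pv_split₀_ok raw.toList), pv_rstrip_join _ (pv_split₀_ok raw.toList)]
  unfold pvNorm PySem.Str.strip PySem.Str.join PySem.Str.split₀
  rw [List.map_map]
  have hmap : (PySem.Chars.split₀ raw.toList).map (String.toList ∘ String.ofList)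
      = PySem.Chars.split₀ raw.toList := by simp [Function.comp_def]
  rw [hmap, String.toList_ofList, show " ".toList = [' '] from rfl, key]

-- A's first foldl equals pvMatches
theorem pv_foldA (rows : List String) (acc : List String) :
    rows.foldl
      (fun (lines : List String) raw_line =>
        let line := PySem.Str.join " " (PySem.Str.split₀ raw_line)
        if line = "" then lines
        else
          let lowered := PySem.Str.lower line
          if PROGRAM_KEYWORDS.any (fun keyword => PySem.Str.isIn keyword lowered) then
            lines ++ [line]
          else lines) acc = acc ++ pvMatches rows := by
  induction rows generalizing acc with
  | nil => simp [pvMatches]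
  | cons raw rest ih =>
    rw [List.foldl_cons, ih]
    simp only [pvMatches, pvNorm, pvAnyKw]
    split
    · simp
    · split <;> simp

-- _dedupe's foldl equals pvDedupeGo
theorem pv_foldD (vs : List String) (seen : PySem.Set String) (out : List String) :
    (vs.foldl
      (fun (st : PySem.Set String × List String) value =>
        let item := PySem.Str.strip value
        if item = "" ∨ PySem.Set.contains st.1 item then st
        else (PySem.Set.add st.1 item, st.2 ++ [item])) (seen, out)).2
      = out ++ pvDedupeGo vs seen := by
  induction vs generalizing seen out with
  | nil => simp [pvDedupeGo]
  | cons v rest ih =>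
    rw [List.foldl_cons]
    simp only [pvDedupeGo]
    split
    · rw [ih]
    · rw [ih]; simp

theorem pv_dedupe_matches (rows : List String) (seen : PySem.Set String) :
    pvDedupeGo (pvMatches rows) seen = pvCollect rows seen := by
  induction rows generalizing seen with
  | nil => rfl
  | cons raw rest ih =>
    simp only [pvMatches, pvCollect]
    split
    · next h0 => simp [h0, ih]
    · next h0 =>
      split
      · next hk =>
        simp only [pvDedupeGo, pv_strip_norm]
        by_cases hc : PySem.Set.contains seen (pvNorm raw) = true
        · simp [h0, ih]
        · simp [h0, ih]
      · next hk => simp [h0, ih]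

theorem pv_go_collect (rows : List String) (seen : PySem.Set String) (out : List String)
    (h : out.length < 25) :
    kwl_go rows seen out = out ++ (pvCollect rows seen).take (25 - out.length) := by
  induction rows generalizing seen out with
  | nil => simp [kwl_go, pvCollect]
  | cons raw rest ih =>
    simp only [kwl_go, pvCollect, pvNorm, pvAnyKw]
    split
    · next hsk => rw [ih _ _ h]
    · next hsk =>
      split
      · next hk =>
        by_cases h25 : (out ++ [PySem.Str.join " " (PySem.Str.split₀ raw)]).length = 25
        · have hlen : out.length + 1 = 25 := by simpa using h25
          simp [h25, show 25 - out.length = 1 by omega]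
        · have hlt : (out ++ [PySem.Str.join " " (PySem.Str.split₀ raw)]).length < 25 := by
            simp at h25 ⊢
            omega
          rw [if_neg h25, ih _ _ hlt]
          have h1 : 25 - out.length
              = (25 - (out ++ [PySem.Str.join " " (PySem.Str.split₀ raw)]).length) + 1 := by
            simp at h25 ⊢
            omega
          simp [h1, List.take_succ_cons]
      · next hk => rw [ih _ _ h]

-- ===== VERDICT (by name: the statement is the Claim_ definition above) =====
theorem keyword_lines_py_spec : Claim_equal_keyword_lines_py := by
  intro text _
  unfold Spec_keyword_lines_py keyword_lines_py keyword_lines_py_alt dedupe_py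
  rw [pv_foldA]
  simp only [List.nil_append]
  rw [pv_foldD]
  simp only [List.nil_append]
  rw [pv_dedupe_matches, pv_go_collect _ _ _ (by simp),
    PySem.List.slice_to _ (by norm_num)]
  simp
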